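-- pv_equiv track=rewrite | github.com/sandeepkvelagam/ODDSIDE | backend/ai_service/rsvp_tracker.py | _calc_rsvp_stats
-- ===== SOURCE A (Python) =====
-- from typing import Dict, List, Optional
--
-- def _calc_rsvp_stats(players: List[Dict]) -> Dict:
--     """Calculate RSVP statistics."""
--     confirmed = sum(1 for p in players if p.get("rsvp_status") == "confirmed")
--     declined = sum(1 for p in players if p.get("rsvp_status") == "declined")
--     maybe = sum(1 for p in players if p.get("rsvp_status") == "maybe")
--     pending = len(players) - confirmed - declined - maybe
--     return {
--         "confirmed": confirmed,
--         "declined": declined,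
--         "maybe": maybe,
--         "pending": pending,
--         "total": len(players)
--     }
-- ===== SOURCE B (Python) =====
-- def _calc_rsvp_stats(players):
--     """Calculate RSVP statistics in one pass over the players."""
--     confirmed = declined = maybe = 0
--     for p in players:
--         s = p.get("rsvp_status")
--         if s == "confirmed":
--             confirmed += 1
--         elif s == "declined":
--             declined += 1
--         elif s == "maybe":
--             maybe += 1
--     return {
--         "confirmed": confirmed,
--         "declined": declined,
--         "maybe": maybe,
--         "pending": len(players) - confirmed - declined - maybe,
--         "total": len(players)
--     }
-- ===== Notes on version B (the rewrite author's own statement) =====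
-- stated objective: simpler
-- what changed: Replaces A's three separate filtered sum-comprehensions (three scans of the list) with a single loop that maintains three running counters, reading each player's rsvp_status once; pending stays a remainder.
import Mathlib
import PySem

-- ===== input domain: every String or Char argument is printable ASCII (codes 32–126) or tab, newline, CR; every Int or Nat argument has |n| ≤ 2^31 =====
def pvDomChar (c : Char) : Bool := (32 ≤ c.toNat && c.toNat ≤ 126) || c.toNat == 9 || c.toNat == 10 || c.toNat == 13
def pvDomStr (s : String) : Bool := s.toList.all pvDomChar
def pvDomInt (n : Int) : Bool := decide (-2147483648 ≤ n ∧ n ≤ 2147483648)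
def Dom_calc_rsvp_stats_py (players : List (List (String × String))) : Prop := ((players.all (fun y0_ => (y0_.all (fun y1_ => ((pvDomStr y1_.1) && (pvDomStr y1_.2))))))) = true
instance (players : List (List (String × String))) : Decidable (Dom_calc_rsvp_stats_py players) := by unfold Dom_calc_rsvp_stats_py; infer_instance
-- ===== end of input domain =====

-- B replaces A's three filtered sum-scans with a single loop keeping three running counters (simpler decomposition; same cost class).


-- ===== PORT A =====
-- p.get("rsvp_status") on the player dict
def pvRsvpGet (p : List (String × String)) : Option String :=
  (PySem.Dict.ofList p).get? "rsvp_status"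

def calc_rsvp_stats_py (players : List (List (String × String))) : List (String × Int) :=
  let confirmed : Int := players.foldl (fun acc p => if pvRsvpGet p == some "confirmed" then acc + 1 else acc) 0
  let declined : Int := players.foldl (fun acc p => if pvRsvpGet p == some "declined" then acc + 1 else acc) 0
  let maybe : Int := players.foldl (fun acc p => if pvRsvpGet p == some "maybe" then acc + 1 else acc) 0
  let pending : Int := (players.length : Int) - confirmed - declined - maybe
  [("confirmed", confirmed), ("declined", declined), ("maybe", maybe),
   ("pending", pending), ("total", (players.length : Int))]

-- ===== PORT B =====
-- the single pass: three counters threaded through one traversal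
def pvRsvpLoop (players : List (List (String × String))) (c d m : Int) : Int × Int × Int :=
  match players with
  | [] => (c, d, m)
  | p :: rest =>
    let s := pvRsvpGet p
    if s == some "confirmed" then pvRsvpLoop rest (c + 1) d m
    else if s == some "declined" then pvRsvpLoop rest c (d + 1) m
    else if s == some "maybe" then pvRsvpLoop rest c d (m + 1)
    else pvRsvpLoop rest c d m

def calc_rsvp_stats_py_alt (players : List (List (String × String))) : List (String × Int) :=
  let cdm := pvRsvpLoop players 0 0 0
  [("confirmed", cdm.1), ("declined", cdm.2.1), ("maybe", cdm.2.2),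
   ("pending", (players.length : Int) - cdm.1 - cdm.2.1 - cdm.2.2),
   ("total", (players.length : Int))]

-- ===== PRECONDITION & SPEC =====
def Spec_calc_rsvp_stats_py (players : List (List (String × String))) (out : List (String × Int)) : Prop := out = calc_rsvp_stats_py_alt players
instance (players : List (List (String × String))) (out : List (String × Int)) : Decidable (Spec_calc_rsvp_stats_py players out) := by unfold Spec_calc_rsvp_stats_py; infer_instance

-- ===== CLAIM (what is proved, stated in full; the proofs are below) =====
def Claim_equal_calc_rsvp_stats_py : Prop := ∀ (players : List (List (String × String))), Dom_calc_rsvp_stats_py players → Spec_calc_rsvp_stats_py players (calc_rsvp_stats_py players)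

-- ===== LEMMAS AND PROOFS =====
-- A's 0/1-sum from an accumulator is the accumulator plus a countP
theorem pv_foldl_count {α : Type} (f : α → Bool) (l : List α) (a : Int) :
    l.foldl (fun acc p => if f p then acc + 1 else acc) a = a + (l.countP f : Int) := by
  induction l generalizing a with
  | nil => simp
  | cons x xs ih =>
    by_cases h : f x <;> simp [List.countP_cons, h, ih] <;> ring

-- B's single pass computes the three countP's at once
theorem pv_loop_eq (l : List (List (String × String))) (c d m : Int) :
    pvRsvpLoop l c d m =
      (c + (l.countP (fun p => pvRsvpGet p == some "confirmed") : Int),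
       d + (l.countP (fun p => pvRsvpGet p == some "declined") : Int),
       m + (l.countP (fun p => pvRsvpGet p == some "maybe") : Int)) := by
  induction l generalizing c d m with
  | nil => simp [pvRsvpLoop]
  | cons p rest ih =>
    simp only [pvRsvpLoop]
    by_cases h1 : pvRsvpGet p = some "confirmed"
    · simp [h1, ih, List.countP_cons]; ring
    · by_cases h2 : pvRsvpGet p = some "declined"
      · simp [h1, h2, ih, List.countP_cons]; ring
      · by_cases h3 : pvRsvpGet p = some "maybe"
        · simp [h1, h2, h3, ih, List.countP_cons]; ring
        · simp [h1, h2, h3, ih, List.countP_cons]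

-- ===== VERDICT (by name: the statement is the Claim_ definition above) =====
theorem calc_rsvp_stats_py_spec : Claim_equal_calc_rsvp_stats_py := by
  intro players _
  unfold Spec_calc_rsvp_stats_py calc_rsvp_stats_py calc_rsvp_stats_py_alt
  simp only [pv_foldl_count, pv_loop_eq, zero_add]
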